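-- pv_equiv track=rewrite | github.com/FrMohande/Cours | Programmation/tp2/Anagrammes.py | suivante
-- ===== SOURCE A (Python) =====
-- def suivante(liste_actu,list_Indmax):
--     '''Fonction universel permettant de faire varier les indices d'une liste
--     '''
--     for j in range(len(liste_actu)-1,-1,-1):
--         if (liste_actu[j] < list_Indmax[j] ):
--             liste_actu[j] += 1
--             return True
--         else :
--             liste_actu[j] = 0
--     return False
-- ===== SOURCE B (Python) =====
-- def suivante(liste_actu, list_Indmax):
--     '''Fonction universel permettant de faire varier les indices d'une liste
--     '''
--     # find the rightmost position that can still be incremented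
--     j = -1
--     for i, (a, m) in enumerate(zip(liste_actu, list_Indmax)):
--         if a < m:
--             j = i
--     if j < 0:
--         # no position can advance: everything resets to 0
--         for i in range(len(liste_actu)):
--             liste_actu[i] = 0
--         return False
--     liste_actu[j] += 1
--     for i in range(j + 1, len(liste_actu)):
--         liste_actu[i] = 0
--     return True
-- ===== Notes on version B (the rewrite author's own statement) =====
-- stated objective: alternative
-- what changed: Replaces the right-to-left carry loop with early return by a left-to-right scan that first finds the rightmost incrementable position over zip(liste_actu, list_Indmax), then writes the increment and trailing zeros (or a full reset) in a second pass.
import Mathlib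
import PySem

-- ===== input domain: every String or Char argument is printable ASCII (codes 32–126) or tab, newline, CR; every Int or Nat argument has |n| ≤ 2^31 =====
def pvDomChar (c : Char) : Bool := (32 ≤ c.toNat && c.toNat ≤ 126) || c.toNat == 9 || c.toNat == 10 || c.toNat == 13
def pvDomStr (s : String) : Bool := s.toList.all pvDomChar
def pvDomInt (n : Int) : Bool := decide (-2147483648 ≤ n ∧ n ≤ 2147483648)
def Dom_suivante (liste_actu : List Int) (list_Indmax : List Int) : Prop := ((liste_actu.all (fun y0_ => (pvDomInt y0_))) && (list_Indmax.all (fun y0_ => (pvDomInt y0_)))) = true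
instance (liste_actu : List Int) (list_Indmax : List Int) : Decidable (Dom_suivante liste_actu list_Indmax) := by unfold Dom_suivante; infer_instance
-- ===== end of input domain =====

-- B replaces A's right-to-left carry loop by a left-to-right scan locating the rightmost
-- incrementable position, then a write pass; both Pythons mutate liste_actu in place
-- identically, and the equivalence proved here is about the returned Bool.

-- ===== PORT A =====
-- the carry loop: j runs len-1 … 0 (k = j+1 remaining indices); setting actu[j] := 0 on the
-- carry branch is carried in the list state, as in the Python
def suivanteLoopA (list_Indmax : List Int) (liste_actu : List Int) : Nat → Bool
  | 0 => false
  | k + 1 =>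
    match PySem.List.pyGet? liste_actu (k : Int), PySem.List.pyGet? list_Indmax (k : Int) with
    | some a, some m =>
      if a < m then true
      else suivanteLoopA list_Indmax (liste_actu.set k 0) k
    | _, _ => false   -- IndexError in Python; excluded by Pre_suivante

def suivante (liste_actu : List Int) (list_Indmax : List Int) : Bool :=
  suivanteLoopA list_Indmax liste_actu liste_actu.length

-- ===== PORT B =====
-- j := rightmost index of zip(liste_actu, list_Indmax) with a < m, else -1; the Python's
-- write passes only mutate the list and do not affect the returned Bool
def suivante_alt (liste_actu : List Int) (list_Indmax : List Int) : Bool :=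
  let j : Int := (PySem.List.enumerate (liste_actu.zip list_Indmax) 0).foldl
      (fun acc p => if p.2.1 < p.2.2 then p.1 else acc) (-1)
  if j < 0 then false else true

-- ===== PRECONDITION & SPEC =====
-- Pre_ excludes exactly the inputs where A raises IndexError (list_Indmax shorter than liste_actu)
def Pre_suivante (liste_actu : List Int) (list_Indmax : List Int) : Prop :=
  liste_actu.length ≤ list_Indmax.length
instance (liste_actu : List Int) (list_Indmax : List Int) : Decidable (Pre_suivante liste_actu list_Indmax) := by unfold Pre_suivante; infer_instance

def pvWitness_suivante : List Int × List Int := ([0, 1], [2, 2])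

def Spec_suivante (liste_actu : List Int) (list_Indmax : List Int) (out : Bool) : Prop := out = suivante_alt liste_actu list_Indmax
instance (liste_actu : List Int) (list_Indmax : List Int) (out : Bool) : Decidable (Spec_suivante liste_actu list_Indmax out) := by unfold Spec_suivante; infer_instance

-- ===== CLAIM (what is proved, stated in full; the proofs are below) =====
def Claim_equal_suivante : Prop := ∀ (liste_actu : List Int) (list_Indmax : List Int), Dom_suivante liste_actu list_Indmax → Pre_suivante liste_actu list_Indmax → Spec_suivante liste_actu list_Indmax (suivante liste_actu list_Indmax)

-- ===== LEMMAS AND PROOFS =====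

-- A's loop returns true iff some index below k can still be incremented
theorem loopA_true_iff (list_Indmax : List Int) :
    ∀ (k : Nat) (liste_actu : List Int), k ≤ liste_actu.length →
      liste_actu.length ≤ list_Indmax.length →
      (suivanteLoopA list_Indmax liste_actu k = true ↔
        ∃ i, i < k ∧ liste_actu.getD i 0 < list_Indmax.getD i 0)
  | 0, actu, _, _ => by simp [suivanteLoopA]
  | k + 1, actu, hk, hm => by
    have hka : k < actu.length := by omega
    have hkm : k < list_Indmax.length := by omega
    rw [suivanteLoopA, PySem.List.pyGet?_natCast, PySem.List.pyGet?_natCast,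
      List.getElem?_eq_getElem hka, List.getElem?_eq_getElem hkm]
    by_cases h : actu[k] < list_Indmax[k]
    · simp only [h, if_true]
      constructor
      · intro _
        exact ⟨k, by omega, by
          rw [List.getD_eq_getElem _ _ hka, List.getD_eq_getElem _ _ hkm]; exact h⟩
      · intro _; trivial
    · simp only [h, if_false]
      rw [loopA_true_iff list_Indmax k (actu.set k 0) (by simp only [List.length_set]; omega)
        (by simp only [List.length_set]; exact hm)]
      constructor
      · rintro ⟨i, hi, hlt⟩
        refine ⟨i, by omega, ?_⟩
        rwa [List.getD, List.getElem?_set_ne (by omega : k ≠ i), ← List.getD] at hlt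
      · rintro ⟨i, hi, hlt⟩
        rcases Nat.lt_or_ge i k with h2 | h2
        · exact ⟨i, h2, by
            rwa [List.getD, List.getElem?_set_ne (by omega : k ≠ i), ← List.getD]⟩
        · exfalso
          have hik : i = k := by omega
          subst hik
          rw [List.getD_eq_getElem _ _ hka, List.getD_eq_getElem _ _ hkm] at hlt
          exact h hlt

-- B's fold stays negative iff the accumulator started negative and no pair matches
theorem foldB_neg_iff (l : List (Int × Int)) :
    ∀ (s : Nat) (acc : Int),
      ((PySem.List.enumerate l (s : Int)).foldl
          (fun acc p => if p.2.1 < p.2.2 then p.1 else acc) acc < 0) ↔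
        (acc < 0 ∧ ∀ p ∈ l, ¬ p.1 < p.2) := by
  induction l with
  | nil => intro s acc; simp [PySem.List.enumerate_nil]
  | cons p l ih =>
    intro s acc
    rw [PySem.List.enumerate_cons, List.foldl_cons]
    have hs1 : ((s : Int) + 1) = ((s + 1 : Nat) : Int) := by push_cast; ring
    by_cases h : p.1 < p.2
    · simp only [h, if_true]
      rw [hs1, ih (s + 1) (s : Int)]
      constructor
      · rintro ⟨hneg, -⟩; omega
      · rintro ⟨-, hall⟩; exact absurd h (hall p (List.mem_cons_self))
    · simp only [h, if_false]
      rw [hs1, ih (s + 1) acc]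
      constructor
      · rintro ⟨hneg, hall⟩
        exact ⟨hneg, fun q hq => by
          rcases List.mem_cons.mp hq with rfl | hq'
          · exact h
          · exact hall q hq'⟩
      · rintro ⟨hneg, hall⟩
        exact ⟨hneg, fun q hq => hall q (List.mem_cons_of_mem _ hq)⟩

-- ===== VERDICT (by name: the statement is the Claim_ definition above) =====
theorem suivante_spec : Claim_equal_suivante := by
  intro actu imax _ hpre
  unfold Pre_suivante at hpre
  unfold Spec_suivante
  have hA : suivante actu imax = true ↔
      ∃ i, i < actu.length ∧ actu.getD i 0 < imax.getD i 0 :=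
    loopA_true_iff imax actu.length actu le_rfl hpre
  have hB : suivante_alt actu imax = true ↔ ∃ p ∈ actu.zip imax, p.1 < p.2 := by
    unfold suivante_alt
    have h0 : ((0 : Nat) : Int) = (0 : Int) := rfl
    have := foldB_neg_iff (actu.zip imax) 0 (-1)
    rw [h0] at this
    constructor
    · intro hif
      by_contra hno
      have : ((PySem.List.enumerate (actu.zip imax) 0).foldl
          (fun acc p => if p.2.1 < p.2.2 then p.1 else acc) (-1)) < 0 :=
        this.mpr ⟨by norm_num, fun p hp hlt => hno ⟨p, hp, hlt⟩⟩
      simp [this] at hif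
    · intro ⟨p, hp, hlt⟩
      have hnneg : ¬ ((PySem.List.enumerate (actu.zip imax) 0).foldl
          (fun acc p => if p.2.1 < p.2.2 then p.1 else acc) (-1)) < 0 := by
        intro hneg
        exact (this.mp hneg).2 p hp hlt
      simp [hnneg]
  have hbridge : (∃ i, i < actu.length ∧ actu.getD i 0 < imax.getD i 0) ↔
      ∃ p ∈ actu.zip imax, p.1 < p.2 := by
    have hlen : (actu.zip imax).length = actu.length := by
      simp [List.length_zip]; omega
    constructor
    · rintro ⟨i, hi, hlt⟩
      refine ⟨(actu[i], imax[i]'(by omega)), ?_, ?_⟩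
      · have : (actu.zip imax)[i]'(by omega) = (actu[i], imax[i]'(by omega)) :=
          List.getElem_zip
        exact this ▸ List.getElem_mem _
      · rwa [List.getD_eq_getElem _ _ hi, List.getD_eq_getElem _ _ (by omega)] at hlt
    · rintro ⟨p, hp, hlt⟩
      obtain ⟨i, hilen, hpi⟩ := List.mem_iff_getElem.mp hp
      have hi : i < actu.length := by omega
      refine ⟨i, hi, ?_⟩
      rw [List.getD_eq_getElem _ _ hi, List.getD_eq_getElem _ _ (by omega)]
      have : (actu.zip imax)[i]'hilen = (actu[i], imax[i]'(by omega)) :=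
        List.getElem_zip
      rw [this] at hpi
      have h1 : p.1 = actu[i] := by rw [← hpi]
      have h2 : p.2 = imax[i]'(by omega) := by rw [← hpi]
      rw [h1, h2] at hlt
      exact hlt
  have hiff : suivante actu imax = true ↔ suivante_alt actu imax = true :=
    hA.trans (hbridge.trans hB.symm)
  cases ha : suivante actu imax <;> cases hb : suivante_alt actu imax <;> simp_all
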